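-- pv_equiv track=rewrite | github.com/Hoangvu2911/BookRecommendation_ML | scripts/export_models.py | transform_genre
-- ===== SOURCE A (Python) =====
-- def transform_genre(x):
--     if isinstance(x, str):
--         elements = x.split(",")
--         cleaned_elements = []
--         for e in elements:
--             clean_text = e.lower().replace(" ", "").replace("-", "").replace("'", "")
--             cleaned_elements.append(clean_text)
--         return " ".join(cleaned_elements)
--     else:
--         return ""
-- ===== SOURCE B (Python) =====
-- _TABLE = str.maketrans({" ": None, "-": None, "'": None, ",": " "})
--
-- def transform_genre(x):
--     if isinstance(x, str):
--         return x.lower().translate(_TABLE)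
--     else:
--         return ""
-- ===== Notes on version B (the rewrite author's own statement) =====
-- stated objective: simpler
-- what changed: Replaces the split-on-comma loop that cleans each part and rejoins with a single whole-string pass: lowercase once, then one translate table that deletes the space, hyphen and apostrophe characters and maps each comma to a space.
import Mathlib
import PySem

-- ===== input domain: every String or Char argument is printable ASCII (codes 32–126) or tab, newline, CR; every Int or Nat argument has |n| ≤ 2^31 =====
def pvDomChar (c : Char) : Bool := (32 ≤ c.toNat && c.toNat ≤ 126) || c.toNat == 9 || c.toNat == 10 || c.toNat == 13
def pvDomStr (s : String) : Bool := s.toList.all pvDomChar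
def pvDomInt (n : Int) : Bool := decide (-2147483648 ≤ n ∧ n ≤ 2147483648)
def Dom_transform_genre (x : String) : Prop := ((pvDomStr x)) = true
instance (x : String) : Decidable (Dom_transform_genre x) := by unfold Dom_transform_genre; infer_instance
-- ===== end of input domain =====

-- B replaces A's split-on-comma / clean-each-part / rejoin loop by one whole-string pass
-- (lowercase, then a per-character table deleting ' ', '-', '\'' and mapping ',' to ' '); objective: simpler.
-- In Lean the argument is always a String, so A's isinstance-else branch is unreachable and not ported.

-- ===== PORT A =====
def transform_genre (x : String) : String :=
  let elements := PySem.Chars.splitOn x.toList [',']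
  let cleaned := elements.foldl (fun acc e =>
    acc ++ [PySem.Chars.replace
              (PySem.Chars.replace
                (PySem.Chars.replace (PySem.Chars.lower e) [' '] [])
                ['-'] [])
              ['\''] []]) []
  String.mk (PySem.Chars.join [' '] cleaned)

-- ===== PORT B =====
def transform_genre_alt (x : String) : String :=
  String.mk ((PySem.Chars.lower x.toList).filterMap (fun c =>
    if c = ' ' ∨ c = '-' ∨ c = '\'' then none
    else if c = ',' then some ' ' else some c))

-- ===== PRECONDITION & SPEC =====
def Spec_transform_genre (x : String) (out : String) : Prop := out = transform_genre_alt x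
instance (x : String) (out : String) : Decidable (Spec_transform_genre x out) := by unfold Spec_transform_genre; infer_instance

-- ===== CLAIM (what is proved, stated in full; the proofs are below) =====
def Claim_equal_transform_genre : Prop := ∀ (x : String), Dom_transform_genre x → Spec_transform_genre x (transform_genre x)

-- ===== LEMMAS AND PROOFS =====

-- per-character cleaning A applies to each comma-separated part (lower + delete ' ', '-', '\'')
def pvClean (c : Char) : Option Char :=
  let d := PySem.Chars.lowerChar c
  if d = ' ' ∨ d = '-' ∨ d = '\'' then none else some d

-- B's per-character table applied after lowering, i.e. composed with lowerChar
def pvG (c : Char) : Option Char :=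
  let d := PySem.Chars.lowerChar c
  if d = ' ' ∨ d = '-' ∨ d = '\'' then none
  else if d = ',' then some ' ' else some d

-- reference split on ',' (Python str.split keeps empty parts)
def pvSplitC : List Char → List (List Char)
  | [] => [[]]
  | c :: t =>
    if c = ',' then [] :: pvSplitC t
    else match pvSplitC t with
      | [] => [[c]]
      | p :: ps => (c :: p) :: ps

theorem pvSplitC_ne_nil (l : List Char) : pvSplitC l ≠ [] := by
  cases l with
  | nil => simp [pvSplitC]
  | cons c t =>
    simp only [pvSplitC]
    split
    · simp
    · cases h : pvSplitC t <;> simp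

theorem pvReplace_go_single (o : Char) :
    ∀ (fuel : Nat) (l acc : List Char), l.length ≤ fuel →
      PySem.Chars.replace.go [o] [] fuel l acc = acc.reverse ++ l.filter (fun c => c ≠ o) := by
  intro fuel
  induction fuel with
  | zero =>
    intro l acc h
    have : l = [] := List.length_eq_zero_iff.mp (Nat.le_zero.mp h)
    subst this; simp [PySem.Chars.replace.go]
  | succ n ih =>
    intro l acc h
    cases l with
    | nil => simp [PySem.Chars.replace.go]
    | cons c t =>
      simp only [PySem.Chars.replace.go, List.isPrefixOf, List.length, List.drop]
      by_cases hc : c = o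
      · subst hc
        simp only [BEq.rfl, Bool.and_true, if_true, List.length_cons, List.length_nil,
          List.drop_succ_cons, List.drop_zero, List.reverse_nil, List.nil_append]
        rw [ih t acc (by simpa using h)]
        simp
      · rw [if_neg (by simp; exact fun h' => hc h'.symm)]
        rw [ih t (c :: acc) (by simpa using h)]
        simp [hc]

theorem pvReplace_single (o : Char) (l : List Char) :
    PySem.Chars.replace l [o] [] = l.filter (fun c => c ≠ o) := by
  simp only [PySem.Chars.replace]
  rw [if_neg (by simp)]
  exact pvReplace_go_single o l.length l [] (le_refl _)

-- head-merging helper describing splitOn.go's accumulator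
def pvConsHead (p : List Char) : List (List Char) → List (List Char)
  | [] => [p]
  | q :: r => (p ++ q) :: r

theorem pvConsHead_nil (ps : List (List Char)) (h : ps ≠ []) : pvConsHead [] ps = ps := by
  cases ps with
  | nil => exact absurd rfl h
  | cons q r => simp [pvConsHead]

theorem pvSplitOn_go_comma :
    ∀ (fuel : Nat) (l cur : List Char) (acc : List (List Char)), l.length ≤ fuel →
      PySem.Chars.splitOn.go [','] fuel l cur acc =
        acc.reverse ++ pvConsHead cur.reverse (pvSplitC l) := by
  intro fuel
  induction fuel with
  | zero =>
    intro l cur acc h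
    have : l = [] := List.length_eq_zero_iff.mp (Nat.le_zero.mp h)
    subst this; simp [PySem.Chars.splitOn.go, pvSplitC, pvConsHead]
  | succ n ih =>
    intro l cur acc h
    cases l with
    | nil => simp [PySem.Chars.splitOn.go, pvSplitC, pvConsHead]
    | cons c t =>
      simp only [PySem.Chars.splitOn.go, List.isPrefixOf, List.isPrefixOf_nil_left,
        Bool.and_true]
      by_cases hc : c = ','
      · subst hc
        rw [if_pos (by simp)]
        simp only [List.length_cons, List.length_nil, List.drop_succ_cons, List.drop_zero,
          List.drop]
        rw [ih t [] (List.reverse cur :: acc) (by simpa using h)]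
        simp only [pvSplitC, if_pos rfl, List.reverse_cons, List.reverse_nil, List.reverse_nil]
        rw [pvConsHead_nil _ (pvSplitC_ne_nil t)]
        cases pvSplitC t <;> simp [pvConsHead]
      · rw [if_neg (by simp; exact fun h' => hc h'.symm)]
        rw [ih t (c :: cur) acc (by simpa using h)]
        simp only [pvSplitC, if_neg hc, List.reverse_cons]
        congr 1
        cases hps : pvSplitC t with
        | nil => exact absurd hps (pvSplitC_ne_nil t)
        | cons p ps => simp [pvConsHead]

theorem pvSplitOn_comma (l : List Char) :
    PySem.Chars.splitOn l [','] = pvSplitC l := by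
  simp only [PySem.Chars.splitOn]
  rw [pvSplitOn_go_comma (l.length + 1) l [] [] (Nat.le_succ _)]
  simp only [List.reverse_nil, List.nil_append]
  exact pvConsHead_nil _ (pvSplitC_ne_nil l)

-- A's three replace-deletions after lowering, as one filterMap
theorem pvClean_eq' (l : List Char) :
    List.filter (fun a => !decide (a = '\'') && (!decide (a = '-') && !decide (a = ' ')))
        (List.map PySem.Chars.lowerChar l) = l.filterMap pvClean := by
  induction l with
  | nil => simp
  | cons c t ih =>
    simp only [List.map_cons, List.filter_cons, List.filterMap_cons]
    by_cases h1 : PySem.Chars.lowerChar c = ' '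
    · simp [pvClean, h1, ih]
    · by_cases h2 : PySem.Chars.lowerChar c = '-'
      · simp [pvClean, h1, h2, ih]
      · by_cases h3 : PySem.Chars.lowerChar c = '\''
        · simp [pvClean, h1, h2, h3, ih]
        · simp [pvClean, h1, h2, h3, ih]

theorem pvClean_eq (p : List Char) :
    ((((PySem.Chars.lower p).filter (fun c => c ≠ ' ')).filter (fun c => c ≠ '-')).filter
        (fun c => c ≠ '\'')) = p.filterMap pvClean := by
  simp only [PySem.Chars.lower, List.filter_filter, decide_not]
  exact pvClean_eq' p

theorem pvLowerChar_comma (c : Char) (h : PySem.Chars.lowerChar c = ',') : c = ',' := by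
  by_contra hne
  simp only [PySem.Chars.lowerChar] at h
  split at h
  · rename_i hu
    simp only [PySem.Chars.isupper, Bool.and_eq_true, decide_eq_true_eq, Char.le_def] at hu
    have h1 : 65 ≤ c.toNat ∧ c.toNat ≤ 90 := by simpa using hu
    have h2 := congrArg Char.toNat h
    rw [Char.toNat_ofNat, if_pos (Or.inl (by omega : c.toNat + 32 < 55296))] at h2
    have h3 : (','.toNat) = 44 := by decide
    omega
  · exact hne h

theorem pvJoin_append_head (a q : List Char) (r : List (List Char)) :
    PySem.Chars.join [' '] ((a ++ q) :: r) = a ++ PySem.Chars.join [' '] (q :: r) := by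
  cases r with
  | nil => simp [PySem.Chars.join_singleton]
  | cons b s =>
    rw [PySem.Chars.join_cons_cons, PySem.Chars.join_cons_cons]
    simp [List.append_assoc]

theorem pvG_eq_clean (c : Char) (hc : c ≠ ',') : pvG c = pvClean c := by
  have h2 : PySem.Chars.lowerChar c ≠ ',' := fun h => hc (pvLowerChar_comma c h)
  simp only [pvG, pvClean]
  by_cases h1 : PySem.Chars.lowerChar c = ' ' ∨ PySem.Chars.lowerChar c = '-' ∨
      PySem.Chars.lowerChar c = '\''
  · simp [h1]
  · simp [h1, h2]

theorem pvMain (l : List Char) :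
    PySem.Chars.join [' '] ((pvSplitC l).map (fun p => p.filterMap pvClean)) =
      l.filterMap pvG := by
  induction l with
  | nil => simp [pvSplitC, PySem.Chars.join_singleton]
  | cons c t ih =>
    by_cases hc : c = ','
    · subst hc
      simp only [pvSplitC, if_true, List.map_cons, List.filterMap_nil]
      cases hm : (pvSplitC t).map (fun p => p.filterMap pvClean) with
      | nil => exact absurd (List.map_eq_nil_iff.mp hm) (pvSplitC_ne_nil t)
      | cons q r =>
        rw [PySem.Chars.join_cons_cons, ← hm, ih]
        simp [List.filterMap_cons, show pvG ',' = some ' ' from by decide]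
    · simp only [pvSplitC, if_neg hc]
      cases hps : pvSplitC t with
      | nil => exact absurd hps (pvSplitC_ne_nil t)
      | cons p ps =>
        rw [hps] at ih
        simp only [List.map_cons] at ih ⊢
        cases hcl : pvClean c with
        | none =>
          simp only [List.filterMap_cons, hcl, pvG_eq_clean c hc]
          simpa using ih
        | some d =>
          simp only [List.filterMap_cons, hcl, pvG_eq_clean c hc]
          rw [show (d :: List.filterMap pvClean p) = [d] ++ List.filterMap pvClean p from rfl,
            pvJoin_append_head, ih]
          rfl

-- ===== VERDICT (by name: the statement is the Claim_ definition above) =====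
theorem transform_genre_spec : Claim_equal_transform_genre := by
  intro x _
  unfold Spec_transform_genre transform_genre transform_genre_alt
  simp only [PySem.List.foldl_append_singleton_eq_map, List.nil_append, pvSplitOn_comma]
  have hB : (PySem.Chars.lower x.toList).filterMap (fun c =>
      if c = ' ' ∨ c = '-' ∨ c = '\'' then none
      else if c = ',' then some ' ' else some c) = x.toList.filterMap pvG := by
    simp only [PySem.Chars.lower, List.filterMap_map]
    rfl
  rw [hB, ← pvMain]
  have hclean : (fun e => PySem.Chars.replace
      (PySem.Chars.replace (PySem.Chars.replace (PySem.Chars.lower e) [' '] []) ['-'] [])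
      ['\''] []) = (fun p : List Char => p.filterMap pvClean) := by
    funext p
    rw [pvReplace_single, pvReplace_single, pvReplace_single, pvClean_eq]
  rw [hclean]
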